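-- pv_equiv track=rewrite | github.com/piMateusz/Chess_Game | figures.py | get_valid_pos_straight
-- ===== SOURCE A (Python) =====
-- rows = 8
--
-- cols = 8
--
-- def sorting(position_list, x, y):
--     new_list = []
--     for pos in position_list:
--         new_pos = pos[:]
--         pos_x, pos_y = pos[0], pos[1]
--         x_distance = abs(x - pos_x)
--         y_distance = abs(y - pos_y)
--         new_pos.append(x_distance + y_distance)
--         new_list.append(new_pos)
--     new_list = sorted(new_list, key=lambda element: element[2])
--     for pos in new_list:
--         pos.pop(2)
--     return new_list
--
-- def get_valid_pos_straight(x, y):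
--     val_positions = {'up': [], 'down': [], 'right': [], 'left': []}
--     for j in range(-7, 8):
--         if j:
--             if 0 <= x + j < cols:
--                 if j > 0:
--                     val_positions['right'].append([x + j, y])
--                 else:
--                     val_positions['left'].append([x + j, y])
--             if 0 <= y + j < rows:
--                 if j > 0:
--                     val_positions['up'].append([x, y + j])
--                 else:
--                     val_positions['down'].append([x, y + j])
--
--     # sorting
--     for key in val_positions:
--         val_positions[key] = sorting(val_positions[key], x, y)
--
--     return val_positions
-- ===== SOURCE B (Python) =====
-- rows = 8
--
-- cols = 8
--
-- def get_valid_pos_straight(x, y):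
--     # Build each direction directly in ascending-distance order: no sort needed.
--     return {
--         'up':    [[x, y + d] for d in range(1, 8) if 0 <= y + d < rows],
--         'down':  [[x, y - d] for d in range(1, 8) if 0 <= y - d < rows],
--         'right': [[x + d, y] for d in range(1, 8) if 0 <= x + d < cols],
--         'left':  [[x - d, y] for d in range(1, 8) if 0 <= x - d < cols],
--     }
-- ===== Notes on version B (the rewrite author's own statement) =====
-- stated objective: simpler
-- what changed: Replaces A's single -7..7 loop that appends into a dict plus a decorate-with-distance/stable-sort/pop helper by four direct range comprehensions that emit each direction already in ascending-distance order, eliminating the sorting pass entirely.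
import Mathlib
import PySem

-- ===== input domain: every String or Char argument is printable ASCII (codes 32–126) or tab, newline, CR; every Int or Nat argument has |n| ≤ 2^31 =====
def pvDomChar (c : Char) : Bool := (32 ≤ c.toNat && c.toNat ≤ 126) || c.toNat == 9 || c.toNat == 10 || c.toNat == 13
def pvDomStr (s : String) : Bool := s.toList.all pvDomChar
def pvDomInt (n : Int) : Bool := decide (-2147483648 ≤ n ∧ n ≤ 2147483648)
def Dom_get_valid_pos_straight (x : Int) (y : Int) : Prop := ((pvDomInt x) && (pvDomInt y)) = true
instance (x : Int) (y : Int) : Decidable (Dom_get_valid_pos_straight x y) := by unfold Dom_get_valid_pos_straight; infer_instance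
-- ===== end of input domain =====

-- B builds each direction list directly in ascending-distance order with four range
-- comprehensions, replacing A's single -7..7 loop plus decorate/sort/pop helper (objective: simpler).

-- ===== PORT A =====
def pv_rows : Int := 8
def pv_cols : Int := 8

-- sorting(position_list, x, y): decorate with Manhattan distance, stable-sort on it, pop it off.
-- pos[0] / pos[1] / pos.pop(2) are ported with a default / fallback that is never reached:
-- every list passed here has exactly 2 elements (and 3 after the append), so the port is exact.
def pv_sorting (position_list : List (List Int)) (x y : Int) : List (List Int) :=
  let new_list := position_list.foldl (fun acc pos =>
    let new_pos := PySem.List.slice pos none none        -- pos[:]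
    let pos_x := PySem.List.pyGetD pos 0 0               -- pos[0]
    let pos_y := PySem.List.pyGetD pos 1 0               -- pos[1]
    let x_distance := |x - pos_x|
    let y_distance := |y - pos_y|
    acc ++ [new_pos ++ [x_distance + y_distance]]) []    -- new_pos.append; new_list.append
  let new_list := PySem.List.sorted new_list (fun e => PySem.List.pyGetD e 2 0) false
  new_list.map (fun pos => match PySem.List.pop? pos 2 with   -- pos.pop(2), in place
    | some r => r.2
    | none => pos)

def get_valid_pos_straight (x : Int) (y : Int) : List (String × List (List Int)) :=
  let val_positions : PySem.Dict String (List (List Int)) :=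
    PySem.Dict.ofList [("up", []), ("down", []), ("right", []), ("left", [])]
  let val_positions := (PySem.List.pyRange (-7) 8 1).foldl (fun d j =>
    if j ≠ 0 then
      let d :=
        if 0 ≤ x + j ∧ x + j < pv_cols then
          if j > 0 then d.modify "right" [] (fun l => l ++ [[x + j, y]])
          else d.modify "left" [] (fun l => l ++ [[x + j, y]])
        else d
      if 0 ≤ y + j ∧ y + j < pv_rows then
        if j > 0 then d.modify "up" [] (fun l => l ++ [[x, y + j]])
        else d.modify "down" [] (fun l => l ++ [[x, y + j]])
      else d
    else d) val_positions
  -- for key in val_positions: val_positions[key] = sorting(val_positions[key], x, y)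
  let val_positions := val_positions.keys.foldl
    (fun d k => d.insert k (pv_sorting (d.getD k []) x y)) val_positions
  val_positions.items

-- ===== PORT B =====
def get_valid_pos_straight_alt (x : Int) (y : Int) : List (String × List (List Int)) :=
  [("up",    ((PySem.List.pyRange 1 8 1).filter (fun d => decide (0 ≤ y + d ∧ y + d < pv_rows))).map (fun d => [x, y + d])),
   ("down",  ((PySem.List.pyRange 1 8 1).filter (fun d => decide (0 ≤ y - d ∧ y - d < pv_rows))).map (fun d => [x, y - d])),
   ("right", ((PySem.List.pyRange 1 8 1).filter (fun d => decide (0 ≤ x + d ∧ x + d < pv_cols))).map (fun d => [x + d, y])),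
   ("left",  ((PySem.List.pyRange 1 8 1).filter (fun d => decide (0 ≤ x - d ∧ x - d < pv_cols))).map (fun d => [x - d, y]))]

-- ===== PRECONDITION & SPEC =====
def Spec_get_valid_pos_straight (x : Int) (y : Int) (out : List (String × List (List Int))) : Prop := out = get_valid_pos_straight_alt x y
instance (x : Int) (y : Int) (out : List (String × List (List Int))) : Decidable (Spec_get_valid_pos_straight x y out) := by unfold Spec_get_valid_pos_straight; infer_instance

-- ===== CLAIM (what is proved, stated in full; the proofs are below) =====
def Claim_equal_get_valid_pos_straight : Prop := ∀ (x : Int) (y : Int), Dom_get_valid_pos_straight x y → Spec_get_valid_pos_straight x y (get_valid_pos_straight x y)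

-- ===== LEMMAS AND PROOFS =====

-- One iteration of A's main loop on a dict of the fixed shape [up, down, right, left].
theorem pv_step (x y j : Int) (u dn r l : List (List Int)) :
    (if j ≠ 0 then
      let d :=
        if 0 ≤ x + j ∧ x + j < pv_cols then
          if j > 0 then (PySem.Dict.mk [("up", u), ("down", dn), ("right", r), ("left", l)]).modify "right" [] (fun l => l ++ [[x + j, y]])
          else (PySem.Dict.mk [("up", u), ("down", dn), ("right", r), ("left", l)]).modify "left" [] (fun l => l ++ [[x + j, y]])
        else (PySem.Dict.mk [("up", u), ("down", dn), ("right", r), ("left", l)])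
      if 0 ≤ y + j ∧ y + j < pv_rows then
        if j > 0 then d.modify "up" [] (fun l => l ++ [[x, y + j]])
        else d.modify "down" [] (fun l => l ++ [[x, y + j]])
      else d
    else (PySem.Dict.mk [("up", u), ("down", dn), ("right", r), ("left", l)])) =
    PySem.Dict.mk
      [("up",    if j ≠ 0 ∧ (0 ≤ y + j ∧ y + j < pv_rows) ∧ 0 < j then u ++ [[x, y + j]] else u),
       ("down",  if j ≠ 0 ∧ (0 ≤ y + j ∧ y + j < pv_rows) ∧ ¬ 0 < j then dn ++ [[x, y + j]] else dn),
       ("right", if j ≠ 0 ∧ (0 ≤ x + j ∧ x + j < pv_cols) ∧ 0 < j then r ++ [[x + j, y]] else r),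
       ("left",  if j ≠ 0 ∧ (0 ≤ x + j ∧ x + j < pv_cols) ∧ ¬ 0 < j then l ++ [[x + j, y]] else l)] := by
  by_cases h0 : j = 0 <;> by_cases hj : j > 0 <;>
    by_cases hx : 0 ≤ x + j ∧ x + j < pv_cols <;> by_cases hy : 0 ≤ y + j ∧ y + j < pv_rows <;>
    simp [h0, hj, hx, hy, PySem.Dict.modify, PySem.Dict.getD, PySem.Dict.get?, PySem.Dict.insert,
      PySem.Dict.contains]

-- A's main loop keeps the dict in the fixed shape and appends to the four lists independently.
set_option maxHeartbeats 1000000 in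
theorem pv_loop_shape (x y : Int) (js : List Int) (u dn r l : List (List Int)) :
    js.foldl (fun d j =>
      if j ≠ 0 then
        let d :=
          if 0 ≤ x + j ∧ x + j < pv_cols then
            if j > 0 then d.modify "right" [] (fun l => l ++ [[x + j, y]])
            else d.modify "left" [] (fun l => l ++ [[x + j, y]])
          else d
        if 0 ≤ y + j ∧ y + j < pv_rows then
          if j > 0 then d.modify "up" [] (fun l => l ++ [[x, y + j]])
          else d.modify "down" [] (fun l => l ++ [[x, y + j]])
        else d
      else d)
      (PySem.Dict.mk [("up", u), ("down", dn), ("right", r), ("left", l)]) =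
    PySem.Dict.mk
      [("up",    u  ++ (js.filter (fun j => decide (j ≠ 0 ∧ (0 ≤ y + j ∧ y + j < pv_rows) ∧ 0 < j))).map (fun j => [x, y + j])),
       ("down",  dn ++ (js.filter (fun j => decide (j ≠ 0 ∧ (0 ≤ y + j ∧ y + j < pv_rows) ∧ ¬ 0 < j))).map (fun j => [x, y + j])),
       ("right", r  ++ (js.filter (fun j => decide (j ≠ 0 ∧ (0 ≤ x + j ∧ x + j < pv_cols) ∧ 0 < j))).map (fun j => [x + j, y])),
       ("left",  l  ++ (js.filter (fun j => decide (j ≠ 0 ∧ (0 ≤ x + j ∧ x + j < pv_cols) ∧ ¬ 0 < j))).map (fun j => [x + j, y]))] := by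
  induction js generalizing u dn r l with
  | nil => simp
  | cons j js ih =>
    rw [List.foldl_cons, pv_step, ih]
    clear ih
    by_cases h0 : j = 0 <;> by_cases hj : 0 < j <;> by_cases hj2 : j ≤ 0 <;>
      by_cases hx1 : 0 ≤ x + j <;> by_cases hx2 : x + j < pv_cols <;>
      by_cases hy1 : 0 ≤ y + j <;> by_cases hy2 : y + j < pv_rows <;>
      simp [h0, hj, hj2, hx1, hx2, hy1, hy2] <;> omega

-- sorting() on a list whose decorated keys are strictly increasing is the identity.
theorem pv_sorting_inc (x y : Int) (js : List Int) (u v k : Int → Int)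
    (hp : js.Pairwise (fun i j => k i < k j))
    (hk : ∀ j ∈ js, |x - u j| + |y - v j| = k j) :
    pv_sorting (js.map (fun j => [u j, v j])) x y = js.map (fun j => [u j, v j]) := by
  unfold pv_sorting
  simp only [PySem.List.foldl_append_singleton_eq_map, List.nil_append, List.map_map]
  have h1 : (js.map ((fun pos =>
      PySem.List.slice pos none none ++ [|x - PySem.List.pyGetD pos 0 0| + |y - PySem.List.pyGetD pos 1 0|]) ∘ (fun j => [u j, v j])))
      = js.map (fun j => [u j, v j, k j]) := by
    apply List.map_congr_left
    intro j hj
    simp [PySem.List.slice_none_none, PySem.List.pyGetD, PySem.List.pyGet?, PySem.List.pyIdx?, hk j hj]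
  rw [h1]
  rw [PySem.List.sorted_eq_self_of_pairwise]
  · rw [List.map_map]
    apply List.map_congr_left
    intro j hj
    simp [PySem.List.pop?, PySem.List.pyIdx?]
  · rw [List.pairwise_map]
    refine hp.imp ?_
    intro i j hij
    simp [PySem.List.pyGetD, PySem.List.pyGet?, PySem.List.pyIdx?]
    exact le_of_lt hij

-- sorting() on a list whose decorated keys are strictly decreasing reverses it.
theorem pv_sorting_dec (x y : Int) (js : List Int) (u v k : Int → Int)
    (hp : js.Pairwise (fun i j => k j < k i))
    (hk : ∀ j ∈ js, |x - u j| + |y - v j| = k j) :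
    pv_sorting (js.map (fun j => [u j, v j])) x y = (js.map (fun j => [u j, v j])).reverse := by
  unfold pv_sorting
  simp only [PySem.List.foldl_append_singleton_eq_map, List.nil_append, List.map_map]
  have h1 : (js.map ((fun pos =>
      PySem.List.slice pos none none ++ [|x - PySem.List.pyGetD pos 0 0| + |y - PySem.List.pyGetD pos 1 0|]) ∘ (fun j => [u j, v j])))
      = js.map (fun j => [u j, v j, k j]) := by
    apply List.map_congr_left
    intro j hj
    simp [PySem.List.slice_none_none, PySem.List.pyGetD, PySem.List.pyGet?, PySem.List.pyIdx?, hk j hj]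
  rw [h1]
  rw [PySem.List.sorted_eq_of_perm_of_pairwise_lt (ys := (js.map (fun j => [u j, v j, k j])).reverse)]
  · rw [← List.map_reverse, List.map_map, ← List.map_reverse]
    apply List.map_congr_left
    intro j hj
    simp [PySem.List.pop?, PySem.List.pyIdx?]
  · exact List.reverse_perm _
  · rw [List.pairwise_reverse, List.pairwise_map]
    refine hp.imp ?_
    intro i j hij
    simpa [PySem.List.pyGetD, PySem.List.pyGet?, PySem.List.pyIdx?] using hij

-- The 'up' list of A's loop, sorted by sorting(), is B's 'up' comprehension.
theorem pv_up (x y : Int) :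
    pv_sorting (((PySem.List.pyRange (-7) 8 1).filter
        (fun j => !decide (j = 0) && (decide (0 ≤ y + j) && decide (y + j < pv_rows) && decide (0 < j)))).map (fun j => [x, y + j])) x y
      = ((PySem.List.pyRange 1 8 1).filter (fun d => decide (0 ≤ y + d ∧ y + d < pv_rows))).map (fun d => [x, y + d]) := by
  rw [PySem.List.pyRange_one_append (-7) 1 8 (by norm_num) (by norm_num), List.filter_append]
  have h1 : (PySem.List.pyRange (-7) 1 1).filter
      (fun j => !decide (j = 0) && (decide (0 ≤ y + j) && decide (y + j < pv_rows) && decide (0 < j))) = [] := by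
    rw [List.filter_eq_nil_iff]
    intro a ha
    rw [PySem.List.mem_pyRange_one] at ha
    simp
    omega
  have h2 : (PySem.List.pyRange 1 8 1).filter
      (fun j => !decide (j = 0) && (decide (0 ≤ y + j) && decide (y + j < pv_rows) && decide (0 < j)))
      = (PySem.List.pyRange 1 8 1).filter (fun d => decide (0 ≤ y + d ∧ y + d < pv_rows)) := by
    apply List.filter_congr
    intro a ha
    rw [PySem.List.mem_pyRange_one] at ha
    simp [(show ¬ a = 0 by omega), (show (0:Int) < a by omega)]
  rw [h1, List.nil_append, h2]
  refine pv_sorting_inc x y _ (fun _ => x) (fun j => y + j) (fun j => j) ?_ ?_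
  · exact ((PySem.List.pairwise_lt_pyRange_one 1 8).filter _)
  · intro j hj
    have hm := List.mem_filter.mp hj
    rw [PySem.List.mem_pyRange_one] at hm
    have hjpos : (0:Int) < j := by omega
    have hy : y - (y + j) = -j := by ring
    simp [hy, abs_of_pos hjpos]

-- The 'right' list of A's loop, sorted by sorting(), is B's 'right' comprehension.
theorem pv_right (x y : Int) :
    pv_sorting (((PySem.List.pyRange (-7) 8 1).filter
        (fun j => !decide (j = 0) && (decide (0 ≤ x + j) && decide (x + j < pv_cols) && decide (0 < j)))).map (fun j => [x + j, y])) x y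
      = ((PySem.List.pyRange 1 8 1).filter (fun d => decide (0 ≤ x + d ∧ x + d < pv_cols))).map (fun d => [x + d, y]) := by
  rw [PySem.List.pyRange_one_append (-7) 1 8 (by norm_num) (by norm_num), List.filter_append]
  have h1 : (PySem.List.pyRange (-7) 1 1).filter
      (fun j => !decide (j = 0) && (decide (0 ≤ x + j) && decide (x + j < pv_cols) && decide (0 < j))) = [] := by
    rw [List.filter_eq_nil_iff]
    intro a ha
    rw [PySem.List.mem_pyRange_one] at ha
    simp
    omega
  have h2 : (PySem.List.pyRange 1 8 1).filter
      (fun j => !decide (j = 0) && (decide (0 ≤ x + j) && decide (x + j < pv_cols) && decide (0 < j)))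
      = (PySem.List.pyRange 1 8 1).filter (fun d => decide (0 ≤ x + d ∧ x + d < pv_cols)) := by
    apply List.filter_congr
    intro a ha
    rw [PySem.List.mem_pyRange_one] at ha
    simp [(show ¬ a = 0 by omega), (show (0:Int) < a by omega)]
  rw [h1, List.nil_append, h2]
  refine pv_sorting_inc x y _ (fun j => x + j) (fun _ => y) (fun j => j) ?_ ?_
  · exact ((PySem.List.pairwise_lt_pyRange_one 1 8).filter _)
  · intro j hj
    have hm := List.mem_filter.mp hj
    rw [PySem.List.mem_pyRange_one] at hm
    have hjpos : (0:Int) < j := by omega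
    have hx : x - (x + j) = -j := by ring
    simp [hx, abs_of_pos hjpos]

-- The 'down' list of A's loop is collected far-to-near; sorting() reverses it into B's 'down'.
theorem pv_down (x y : Int) :
    pv_sorting (((PySem.List.pyRange (-7) 8 1).filter
        (fun j => !decide (j = 0) && (decide (0 ≤ y + j) && decide (y + j < pv_rows) && decide (j ≤ 0)))).map (fun j => [x, y + j])) x y
      = ((PySem.List.pyRange 1 8 1).filter (fun d => decide (0 ≤ y - d ∧ y - d < pv_rows))).map (fun d => [x, y - d]) := by
  rw [PySem.List.pyRange_one_append (-7) 0 8 (by norm_num) (by norm_num), List.filter_append]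
  have h1 : (PySem.List.pyRange 0 8 1).filter
      (fun j => !decide (j = 0) && (decide (0 ≤ y + j) && decide (y + j < pv_rows) && decide (j ≤ 0))) = [] := by
    rw [List.filter_eq_nil_iff]
    intro a ha
    rw [PySem.List.mem_pyRange_one] at ha
    simp
    omega
  rw [h1, List.append_nil]
  rw [pv_sorting_dec x y _ (fun _ => x) (fun j => y + j) (fun j => -j) ?hp ?hk]
  case hp =>
    refine ((PySem.List.pairwise_lt_pyRange_one (-7) 0).filter _).imp ?_
    intro i j hij
    exact neg_lt_neg hij
  case hk =>
    intro j hj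
    have hm := List.mem_filter.mp hj
    rw [PySem.List.mem_pyRange_one] at hm
    have hy : y - (y + j) = -j := by ring
    simp [hy]
    omega
  have hr : PySem.List.pyRange (-7) 0 1 = ((PySem.List.pyRange 1 8 1).map (fun d => -d)).reverse := by decide
  rw [hr, List.filter_reverse, List.filter_map, List.map_reverse, List.reverse_reverse, List.map_map]
  have h2 : (PySem.List.pyRange 1 8 1).filter
      ((fun j => !decide (j = 0) && (decide (0 ≤ y + j) && decide (y + j < pv_rows) && decide (j ≤ 0))) ∘ (fun d => -d))
      = (PySem.List.pyRange 1 8 1).filter (fun d => decide (0 ≤ y - d ∧ y - d < pv_rows)) := by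
    apply List.filter_congr
    intro a ha
    rw [PySem.List.mem_pyRange_one] at ha
    simp only [Function.comp]
    have e1 : y + -a = y - a := by ring
    simp [e1, (show ¬ -a = 0 by omega), (show -a ≤ 0 by omega)]
  rw [h2]
  apply List.map_congr_left
  intro a ha
  simp [Function.comp]
  ring

-- The 'left' list of A's loop is collected far-to-near; sorting() reverses it into B's 'left'.
theorem pv_left (x y : Int) :
    pv_sorting (((PySem.List.pyRange (-7) 8 1).filter
        (fun j => !decide (j = 0) && (decide (0 ≤ x + j) && decide (x + j < pv_cols) && decide (j ≤ 0)))).map (fun j => [x + j, y])) x y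
      = ((PySem.List.pyRange 1 8 1).filter (fun d => decide (0 ≤ x - d ∧ x - d < pv_cols))).map (fun d => [x - d, y]) := by
  rw [PySem.List.pyRange_one_append (-7) 0 8 (by norm_num) (by norm_num), List.filter_append]
  have h1 : (PySem.List.pyRange 0 8 1).filter
      (fun j => !decide (j = 0) && (decide (0 ≤ x + j) && decide (x + j < pv_cols) && decide (j ≤ 0))) = [] := by
    rw [List.filter_eq_nil_iff]
    intro a ha
    rw [PySem.List.mem_pyRange_one] at ha
    simp
    omega
  rw [h1, List.append_nil]
  rw [pv_sorting_dec x y _ (fun j => x + j) (fun _ => y) (fun j => -j) ?hp ?hk]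
  case hp =>
    refine ((PySem.List.pairwise_lt_pyRange_one (-7) 0).filter _).imp ?_
    intro i j hij
    exact neg_lt_neg hij
  case hk =>
    intro j hj
    have hm := List.mem_filter.mp hj
    rw [PySem.List.mem_pyRange_one] at hm
    have hx : x - (x + j) = -j := by ring
    simp [hx]
    omega
  have hr : PySem.List.pyRange (-7) 0 1 = ((PySem.List.pyRange 1 8 1).map (fun d => -d)).reverse := by decide
  rw [hr, List.filter_reverse, List.filter_map, List.map_reverse, List.reverse_reverse, List.map_map]
  have h2 : (PySem.List.pyRange 1 8 1).filter
      ((fun j => !decide (j = 0) && (decide (0 ≤ x + j) && decide (x + j < pv_cols) && decide (j ≤ 0))) ∘ (fun d => -d))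
      = (PySem.List.pyRange 1 8 1).filter (fun d => decide (0 ≤ x - d ∧ x - d < pv_cols)) := by
    apply List.filter_congr
    intro a ha
    rw [PySem.List.mem_pyRange_one] at ha
    simp only [Function.comp]
    have e1 : x + -a = x - a := by ring
    simp [e1, (show ¬ -a = 0 by omega), (show -a ≤ 0 by omega)]
  rw [h2]
  apply List.map_congr_left
  intro a ha
  simp [Function.comp]
  ring

-- ===== VERDICT (by name: the statement is the Claim_ definition above) =====
theorem get_valid_pos_straight_spec : Claim_equal_get_valid_pos_straight := by
  intro x y _
  unfold Spec_get_valid_pos_straight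
  simp only [get_valid_pos_straight]
  have hof : (PySem.Dict.ofList [("up", ([] : List (List Int))), ("down", []), ("right", []), ("left", [])])
      = PySem.Dict.mk [("up", []), ("down", []), ("right", []), ("left", [])] := by decide
  rw [hof, pv_loop_shape]
  simp only [PySem.Dict.keys, List.map_cons, List.map_nil,
    List.foldl_cons, List.foldl_nil, List.nil_append]
  simp [PySem.Dict.insert, PySem.Dict.getD, PySem.Dict.get?, PySem.Dict.contains]
  rw [pv_up, pv_down, pv_right, pv_left]
  simp only [get_valid_pos_straight_alt]
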